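-- pv_equiv track=rewrite | github.com/johnny22245/Med-Flow-UCSC | backend/triage_agent_code/prepare_triage_eval_data/run_triage_agent_eval.py | get_answer_for_question
-- ===== SOURCE A (Python) =====
-- def get_answer_for_question(question, gold_answers):
--     if not gold_answers:
--         return "Not provided."
--
--     q_norm = question.strip().lower()
--
--     for k, v in gold_answers.items():
--         if k.strip().lower() == q_norm:
--             return v
--
--     for k, v in gold_answers.items():
--         if q_norm in k.strip().lower() or k.strip().lower() in q_norm:
--             return v
--
--     return "Not provided."
-- ===== SOURCE B (Python) =====
-- def get_answer_for_question(question, gold_answers):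
--     if not gold_answers:
--         return "Not provided."
--
--     q_norm = question.strip().lower()
--     fallback = None
--     for k, v in gold_answers.items():
--         k_norm = k.strip().lower()
--         if k_norm == q_norm:
--             return v
--         elif fallback is None and (q_norm in k_norm or k_norm in q_norm):
--             fallback = v
--     return fallback if fallback is not None else "Not provided."
-- ===== Notes on version B (the rewrite author's own statement) =====
-- stated objective: alternative
-- what changed: Replaced A's two sequential scans (exact pass, then substring pass) by a single pass that returns on the first exact match and records the first substring match in a fallback variable returned after the loop.
import Mathlib
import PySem

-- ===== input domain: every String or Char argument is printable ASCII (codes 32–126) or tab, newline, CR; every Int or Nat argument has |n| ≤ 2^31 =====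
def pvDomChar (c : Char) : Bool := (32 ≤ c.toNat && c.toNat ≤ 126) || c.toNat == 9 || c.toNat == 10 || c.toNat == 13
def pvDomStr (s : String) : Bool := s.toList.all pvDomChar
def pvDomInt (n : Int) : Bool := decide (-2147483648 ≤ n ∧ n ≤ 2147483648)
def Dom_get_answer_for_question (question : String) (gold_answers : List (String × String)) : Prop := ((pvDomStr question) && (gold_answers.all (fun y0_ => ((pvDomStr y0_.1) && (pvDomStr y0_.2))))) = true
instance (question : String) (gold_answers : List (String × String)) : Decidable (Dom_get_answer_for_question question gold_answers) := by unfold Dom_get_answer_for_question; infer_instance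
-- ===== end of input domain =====

-- B merges A's two sequential scans (exact pass, then substring pass) into one pass with a
-- fallback variable; same return value, alternative decomposition.

-- ===== PORT A =====
-- k.strip().lower()
def pvNorm (s : String) : String := PySem.Str.lower (PySem.Str.strip s)

-- first for-loop of A: first pair whose normalized key equals q_norm
def pvScanExact (qn : String) : List (String × String) → Option String
  | [] => none
  | (k, v) :: rest => if pvNorm k == qn then some v else pvScanExact qn rest

-- second for-loop of A: first pair with a substring match (either direction)
def pvScanSub (qn : String) : List (String × String) → Option String
  | [] => none
  | (k, v) :: rest =>
      if PySem.Str.isIn qn (pvNorm k) || PySem.Str.isIn (pvNorm k) qn then some v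
      else pvScanSub qn rest

def get_answer_for_question (question : String) (gold_answers : List (String × String)) : String :=
  if gold_answers.isEmpty then "Not provided."
  else
    let q_norm := pvNorm question
    match pvScanExact q_norm gold_answers with
    | some v => v
    | none =>
      match pvScanSub q_norm gold_answers with
      | some v => v
      | none => "Not provided."

-- ===== PORT B =====
-- B's single loop: return on exact match, record the first substring match as fallback
def pvLoopB (qn : String) (fallback : Option String) : List (String × String) → String
  | [] => match fallback with | some f => f | none => "Not provided."
  | (k, v) :: rest =>
      let k_norm := pvNorm k
      if k_norm == qn then v
      else if fallback.isNone && (PySem.Str.isIn qn k_norm || PySem.Str.isIn k_norm qn) then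
        pvLoopB qn (some v) rest
      else pvLoopB qn fallback rest

def get_answer_for_question_alt (question : String) (gold_answers : List (String × String)) : String :=
  if gold_answers.isEmpty then "Not provided."
  else pvLoopB (pvNorm question) none gold_answers

-- ===== PRECONDITION & SPEC =====
def Spec_get_answer_for_question (question : String) (gold_answers : List (String × String)) (out : String) : Prop := out = get_answer_for_question_alt question gold_answers
instance (question : String) (gold_answers : List (String × String)) (out : String) : Decidable (Spec_get_answer_for_question question gold_answers out) := by unfold Spec_get_answer_for_question; infer_instance

-- ===== CLAIM (what is proved, stated in full; the proofs are below) =====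
def Claim_equal_get_answer_for_question : Prop := ∀ (question : String) (gold_answers : List (String × String)), Dom_get_answer_for_question question gold_answers → Spec_get_answer_for_question question gold_answers (get_answer_for_question question gold_answers)

-- ===== LEMMAS AND PROOFS =====
-- B's loop, with an arbitrary fallback state, computes A's two-scan result
theorem pvLoopB_eq (qn : String) (l : List (String × String)) :
    ∀ fb : Option String,
      pvLoopB qn fb l =
        match pvScanExact qn l with
        | some v => v
        | none =>
          match fb with
          | some f => f
          | none =>
            match pvScanSub qn l with
            | some v => v
            | none => "Not provided." := by
  induction l with
  | nil => intro fb; cases fb <;> rfl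
  | cons p rest ih =>
    intro fb
    obtain ⟨k, v⟩ := p
    cases fb <;>
      simp only [pvLoopB, pvScanExact, pvScanSub, Option.isNone, Bool.and_true, Bool.and_false,
        ih] <;>
      split_ifs <;> simp_all

-- ===== VERDICT (by name: the statement is the Claim_ definition above) =====
theorem get_answer_for_question_spec : Claim_equal_get_answer_for_question := by
  intro question gold_answers _
  unfold Spec_get_answer_for_question get_answer_for_question get_answer_for_question_alt
  by_cases h : gold_answers.isEmpty
  · simp [h]
  · simp only [h, if_false, Bool.false_eq_true]
    rw [pvLoopB_eq]
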